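-- pv_equiv track=rewrite | github.com/Qihang-Zhang/sglang_generate_interface | full_distribution.py | check_if_all_index_included
-- ===== SOURCE A (Python) =====
-- def check_if_all_index_included(full_logprobs, vocab_size):
--     index_list = [logprob[1] for logprob in full_logprobs]
--
--     return_value = True
--     miss_indexes = []
--     for i in range(vocab_size):
--         if i not in index_list:
--             miss_indexes.append(i)
--             return_value = False
--
--     return return_value, miss_indexes
-- ===== SOURCE B (Python) =====
-- def check_if_all_index_included(full_logprobs, vocab_size):
--     idxs = sorted(lp[1] for lp in full_logprobs)
--     miss_indexes = []
--     prev = -1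
--     for x in idxs:
--         if x <= prev:
--             continue
--         if x >= vocab_size:
--             break
--         miss_indexes.extend(range(prev + 1, x))
--         prev = x
--     miss_indexes.extend(range(prev + 1, vocab_size))
--     return not miss_indexes, miss_indexes
-- ===== Notes on version B (the rewrite author's own statement) =====
-- stated objective: faster
-- what changed: Sorts the present indices once and emits the missing indices as the gaps between consecutive distinct in-range values in one walk, instead of testing every i in range(vocab_size) for membership in a list; no membership test remains.
import Mathlib
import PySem

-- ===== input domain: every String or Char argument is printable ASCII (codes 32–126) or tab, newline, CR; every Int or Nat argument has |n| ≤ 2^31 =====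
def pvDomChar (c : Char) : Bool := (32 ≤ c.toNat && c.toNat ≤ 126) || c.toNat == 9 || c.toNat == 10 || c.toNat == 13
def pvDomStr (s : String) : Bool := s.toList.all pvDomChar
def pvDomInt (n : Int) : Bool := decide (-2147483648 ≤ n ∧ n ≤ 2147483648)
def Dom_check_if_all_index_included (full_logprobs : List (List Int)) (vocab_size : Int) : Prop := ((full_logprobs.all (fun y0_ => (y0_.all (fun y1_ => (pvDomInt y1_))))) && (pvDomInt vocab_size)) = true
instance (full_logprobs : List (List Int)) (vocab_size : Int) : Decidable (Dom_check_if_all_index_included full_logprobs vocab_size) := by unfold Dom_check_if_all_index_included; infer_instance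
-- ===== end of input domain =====

-- B sorts the present indices once and emits the missing indices as the gaps between
-- consecutive distinct in-range values in one walk, removing A's per-index membership scan (faster).

-- ===== PORT A =====
def check_if_all_index_included (full_logprobs : List (List Int)) (vocab_size : Int) : Bool × List Int :=
  let index_list : List Int := full_logprobs.map (fun logprob => (PySem.List.pyGet? logprob 1).getD 0)
  (PySem.List.pyRange 0 vocab_size 1).foldl
    (fun (st : Bool × List Int) i =>
      if i ∈ index_list then st else (false, st.2 ++ [i]))
    (true, [])

-- ===== PORT B =====
-- the gap walk of Source B: skip duplicates/negatives (x <= prev), break at x >= vocab_size,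
-- otherwise emit range(prev+1, x); after the loop emit range(prev+1, vocab_size)
def pvGaps (vs : Int) : List Int → Int → List Int
  | [], prev => PySem.List.pyRange (prev + 1) vs 1
  | x :: rest, prev =>
      if x ≤ prev then pvGaps vs rest prev
      else if vs ≤ x then PySem.List.pyRange (prev + 1) vs 1
      else PySem.List.pyRange (prev + 1) x 1 ++ pvGaps vs rest x

def check_if_all_index_included_alt (full_logprobs : List (List Int)) (vocab_size : Int) : Bool × List Int :=
  let idxs : List Int :=
    PySem.List.sorted (full_logprobs.map (fun lp => (PySem.List.pyGet? lp 1).getD 0)) (fun x => x) false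
  let miss_indexes : List Int := pvGaps vocab_size idxs (-1)
  (miss_indexes.isEmpty, miss_indexes)

-- ===== PRECONDITION & SPEC =====
-- Pre_ excludes exactly the inputs where A raises IndexError: some inner list has fewer than 2 elements.
def Pre_check_if_all_index_included (full_logprobs : List (List Int)) (vocab_size : Int) : Prop :=
  ∀ lp ∈ full_logprobs, 2 ≤ lp.length
instance (full_logprobs : List (List Int)) (vocab_size : Int) : Decidable (Pre_check_if_all_index_included full_logprobs vocab_size) := by unfold Pre_check_if_all_index_included; infer_instance
def pvWitness_check_if_all_index_included : List (List Int) × Int := ([[0, 1], [0, 3]], 4)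

def Spec_check_if_all_index_included (full_logprobs : List (List Int)) (vocab_size : Int) (out : Bool × List Int) : Prop := out = check_if_all_index_included_alt full_logprobs vocab_size
instance (full_logprobs : List (List Int)) (vocab_size : Int) (out : Bool × List Int) : Decidable (Spec_check_if_all_index_included full_logprobs vocab_size out) := by unfold Spec_check_if_all_index_included; infer_instance

-- ===== CLAIM (what is proved, stated in full; the proofs are below) =====
def Claim_equal_check_if_all_index_included : Prop := ∀ (full_logprobs : List (List Int)) (vocab_size : Int), Dom_check_if_all_index_included full_logprobs vocab_size → Pre_check_if_all_index_included full_logprobs vocab_size → Spec_check_if_all_index_included full_logprobs vocab_size (check_if_all_index_included full_logprobs vocab_size)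

-- ===== LEMMAS AND PROOFS =====

-- A's loop computes (filter empty?, the kept indices in range order).
theorem foldA_eq (ixs : List Int) (R : List Int) (b : Bool) (acc : List Int) :
    R.foldl (fun (st : Bool × List Int) i =>
        if i ∈ ixs then st else (false, st.2 ++ [i])) (b, acc)
      = ((b && (R.filter (fun i => !decide (i ∈ ixs))).isEmpty),
         acc ++ R.filter (fun i => !decide (i ∈ ixs))) := by
  induction R generalizing b acc with
  | nil => simp
  | cons r R ih =>
    by_cases h : r ∈ ixs
    · simp [List.foldl_cons, h, ih]
    · simp [List.foldl_cons, h, ih]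

-- the gap walk on a (≤)-sorted list is the filtered range
theorem pvGaps_eq_filter (vs : Int) (L : List Int) (prev : Int)
    (hL : L.Pairwise (fun a b : Int => a ≤ b)) :
    pvGaps vs L prev = (PySem.List.pyRange (prev + 1) vs 1).filter (fun i => !decide (i ∈ L)) := by
  induction L generalizing prev with
  | nil => simp [pvGaps]
  | cons x rest ih =>
    have hx : ∀ y ∈ rest, x ≤ y := fun y hy => (List.pairwise_cons.mp hL).1 y hy
    have hrest : rest.Pairwise (fun a b : Int => a ≤ b) := (List.pairwise_cons.mp hL).2
    by_cases h1 : x ≤ prev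
    · rw [pvGaps, if_pos h1, ih prev hrest]
      refine (List.filter_congr ?_).symm
      intro i hi
      have hmem := (PySem.List.mem_pyRange_one).mp hi
      have hne : i ≠ x := by omega
      simp [List.mem_cons, hne]
    · rw [pvGaps, if_neg h1]
      by_cases h2 : vs ≤ x
      · rw [if_pos h2]
        refine Eq.symm ?_
        rw [List.filter_eq_self]
        intro i hi
        have hmem := (PySem.List.mem_pyRange_one).mp hi
        simp only [Bool.not_eq_eq_eq_not, Bool.not_true, decide_eq_false_iff_not]
        intro hin
        rcases List.mem_cons.mp hin with h | h
        · omega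
        · have := hx i h; omega
      · rw [if_neg h2]
        have hxlt : prev < x := by omega
        have hxvs : x < vs := by omega
        have hsplit : PySem.List.pyRange (prev + 1) vs 1
            = PySem.List.pyRange (prev + 1) x 1 ++ PySem.List.pyRange x vs 1 :=
          PySem.List.pyRange_one_append (prev + 1) x vs (by omega) (by omega)
        have hsplit2 : PySem.List.pyRange x vs 1 = x :: PySem.List.pyRange (x + 1) vs 1 :=
          PySem.List.pyRange_one_cons hxvs
        rw [hsplit, hsplit2, List.filter_append, List.filter_cons]
        have hxin : (!decide (x ∈ x :: rest)) = false := by simp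
        rw [hxin]
        have hleft : (PySem.List.pyRange (prev + 1) x 1).filter (fun i => !decide (i ∈ x :: rest))
            = PySem.List.pyRange (prev + 1) x 1 := by
          rw [List.filter_eq_self]
          intro i hi
          have hmem := (PySem.List.mem_pyRange_one).mp hi
          simp only [Bool.not_eq_eq_eq_not, Bool.not_true, decide_eq_false_iff_not]
          intro hin
          rcases List.mem_cons.mp hin with h | h
          · omega
          · have := hx i h; omega
        have hright : (PySem.List.pyRange (x + 1) vs 1).filter (fun i => !decide (i ∈ x :: rest))
            = (PySem.List.pyRange (x + 1) vs 1).filter (fun i => !decide (i ∈ rest)) := by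
          refine List.filter_congr ?_
          intro i hi
          have hmem := (PySem.List.mem_pyRange_one).mp hi
          have hne : i ≠ x := by omega
          simp [List.mem_cons, hne]
        rw [hleft, hright, ih x hrest]
        simp

-- membership in the sorted list is membership in the original
theorem mem_sorted_id (xs : List Int) (i : Int) :
    (i ∈ PySem.List.sorted xs (fun x => x) false) ↔ i ∈ xs :=
  PySem.List.mem_sorted xs (fun x => x) false i

theorem check_if_all_index_included_spec' (full_logprobs : List (List Int)) (vocab_size : Int) :
    check_if_all_index_included full_logprobs vocab_size
      = check_if_all_index_included_alt full_logprobs vocab_size := by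
  unfold check_if_all_index_included check_if_all_index_included_alt
  set ixs := full_logprobs.map (fun lp => (PySem.List.pyGet? lp 1).getD 0) with hixs
  set S := PySem.List.sorted ixs (fun x => x) false with hS
  rw [foldA_eq]
  have hpair : S.Pairwise (fun a b : Int => a ≤ b) := PySem.List.sorted_pairwise ixs (fun x => x)
  have hgaps : pvGaps vocab_size S (-1)
      = (PySem.List.pyRange 0 vocab_size 1).filter (fun i => !decide (i ∈ S)) := by
    have := pvGaps_eq_filter vocab_size S (-1) hpair
    simpa using this
  have hfilter : (PySem.List.pyRange 0 vocab_size 1).filter (fun i => !decide (i ∈ S))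
      = (PySem.List.pyRange 0 vocab_size 1).filter (fun i => !decide (i ∈ ixs)) := by
    refine List.filter_congr ?_
    intro i _
    simp only [hS, mem_sorted_id]
  simp [hgaps, hfilter]

-- ===== VERDICT (by name: the statement is the Claim_ definition above) =====
theorem check_if_all_index_included_spec : Claim_equal_check_if_all_index_included := by
  intro fl vs _ _
  exact check_if_all_index_included_spec' fl vs
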